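-- pv_equiv track=rewrite | github.com/posl/comment_recommendation | script/mod_gen/2_time/zh/208_D/8.py | solve
-- ===== SOURCE A (Python) =====
-- def solve(n,k,a):
--     # 二分探索
--     def is_ok(arg):
--         # 条件を満たすかどうか？問題ごとに定義
--         # ngとokの中点midをargとして受け取る
--         # ここで条件式を書く
--         # return mid >= 0
--         # ここで条件式を書く
--         return sum(max(0, a_i - arg) for a_i in a) <= k
--     # 二分探索
--     def meguru_bisect(ng, ok):
--         # okとngのどちらが大きいかわからないことを考慮
--         while (abs(ok - ng) > 1):
--             mid = (ok + ng) // 2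
--             if is_ok(mid):
--                 ok = mid
--             else:
--                 ng = mid
--         return ok
--     # 解の存在範囲を初期化
--     ok = max(a)
--     ng = 0
--     # 二分探索
--     ans = meguru_bisect(ng, ok)
--     return ans
-- ===== SOURCE B (Python) =====
-- def solve(n, k, a):
--     # Smallest cap x with sum(max(0, a_i - x)) <= k, computed analytically:
--     # on the descending sort b with prefix sums P_i, the excess at x equals
--     # max over i of (P_i - i*x), clamped at 0, so the feasibility threshold is
--     # max_i ceil((P_i - k) / i); the candidate caps are 1..max(a), so the
--     # threshold is clamped into that range (max(a) when no candidate works).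
--     b = sorted(a, reverse=True)
--     need = 1
--     pref = 0
--     for i, v in enumerate(b, 1):
--         pref += v
--         need = max(need, -((k - pref) // i))
--     return min(b[0], need)
-- ===== Notes on version B (the rewrite author's own statement) =====
-- stated objective: faster
-- what changed: Replaces A's binary search over cap values (a full excess-sum pass per probe) by one descending sort with prefix sums: the feasibility threshold is max_i ceil((P_i - k)/i), clamped into the candidate range [1, max(a)].
-- intended difference: On lists whose elements are all negative (and do not contain -1) with k >= 0, A's bisection bounds ng=0 > ok=max(a) are inverted and it returns the accidental value -1, while B returns max(a), the smallest candidate cap with zero excess, which is the intended value. — e.g. on solve(1, 0, [-3]): A returns -1, B returns -3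
import Mathlib
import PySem

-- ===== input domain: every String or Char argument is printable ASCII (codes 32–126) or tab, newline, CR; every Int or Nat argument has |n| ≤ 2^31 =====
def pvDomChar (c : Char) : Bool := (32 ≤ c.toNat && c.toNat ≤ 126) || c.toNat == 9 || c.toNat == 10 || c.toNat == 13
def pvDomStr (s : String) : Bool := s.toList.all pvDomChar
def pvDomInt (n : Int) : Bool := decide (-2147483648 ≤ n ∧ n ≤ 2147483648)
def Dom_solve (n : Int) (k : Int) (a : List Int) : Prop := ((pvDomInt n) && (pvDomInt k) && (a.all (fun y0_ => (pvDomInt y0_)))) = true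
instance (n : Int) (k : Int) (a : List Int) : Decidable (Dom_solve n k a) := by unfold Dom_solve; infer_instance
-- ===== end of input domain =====

-- B replaces A's value-space binary search by one descending sort with prefix sums:
-- the feasibility threshold is a max of ceiling divisions, clamped into [1, max(a)].

-- ===== PORT A =====
-- is_ok(arg): sum(max(0, a_i - arg) for a_i in a) <= k
def solve_isOk (k : Int) (a : List Int) (arg : Int) : Bool :=
  decide ((a.map (fun ai => max 0 (ai - arg))).sum ≤ k)

-- meguru_bisect(ng, ok); the fuel argument only bounds the number of iterations
-- (|ok - ng| halves each round, so |ok - ng| rounds always suffice): same values as the while loop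
def solve_bisect (k : Int) (a : List Int) : Nat → Int → Int → Int
  | 0, _, ok => ok
  | fuel + 1, ng, ok =>
    if |ok - ng| > 1 then
      if solve_isOk k a (PySem.Int.floordiv (ok + ng) 2) then
        solve_bisect k a fuel ng (PySem.Int.floordiv (ok + ng) 2)
      else
        solve_bisect k a fuel (PySem.Int.floordiv (ok + ng) 2) ok
    else ok

def solve (n : Int) (k : Int) (a : List Int) : Int :=
  solve_bisect k a (((PySem.List.max? a (fun x => x)).getD 0) - 0).natAbs 0
    ((PySem.List.max? a (fun x => x)).getD 0)

-- ===== PORT B =====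
-- the for-loop of Source B over enumerate(b, 1): state (i, pref, need)
def solve_altLoop (k : Int) (i pref need : Int) : List Int → Int
  | [] => need
  | v :: r =>
      let pref' := pref + v
      let need' := max need (-(PySem.Int.floordiv (k - pref') i))
      solve_altLoop k (i + 1) pref' need' r

def solve_alt (n : Int) (k : Int) (a : List Int) : Int :=
  match PySem.List.sorted a (fun x => x) true with
  | [] => 0   -- unreachable under Pre_: b[0] raises IndexError in Source B on []
  | b0 :: rest => min b0 (solve_altLoop k 1 0 1 (b0 :: rest))

-- ===== PRECONDITION & SPEC =====
-- Pre_ excludes only the empty list, on which both Pythons raise (A: ValueError at max(a), B: IndexError at b[0]).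
def Pre_solve (n : Int) (k : Int) (a : List Int) : Prop := a ≠ []
instance (n : Int) (k : Int) (a : List Int) : Decidable (Pre_solve n k a) := by unfold Pre_solve; infer_instance

def pvWitness_solve : Int × Int × List Int := (3, 5, [1, 2, 3])

-- On lists whose elements are all negative (and do not contain -1) with k ≥ 0, A's bisection
-- bounds ng=0 > ok=max(a) are inverted and it returns the accidental value -1, while B returns
-- max(a), the smallest candidate cap with zero excess, which is the intended value.
def D_solve (n : Int) (k : Int) (a : List Int) : Prop :=
  a ≠ [] ∧ 0 ≤ k ∧ (∀ x ∈ a, x < 0) ∧ (-1 : Int) ∉ a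
instance (n : Int) (k : Int) (a : List Int) : Decidable (D_solve n k a) := by unfold D_solve; infer_instance

def Spec_solve (n : Int) (k : Int) (a : List Int) (out : Int) : Prop := ¬ D_solve n k a → out = solve_alt n k a
instance (n : Int) (k : Int) (a : List Int) (out : Int) : Decidable (Spec_solve n k a out) := by unfold Spec_solve; infer_instance

def pvDiffWitness_solve : Int × Int × List Int := (1, 0, [-3])
def pvDiffWitnessOut_solve : Int × Int := (-1, -3)

-- ===== CLAIM (what is proved, stated in full; the proofs are below) =====
def Claim_unchanged_solve : Prop := ∀ (n : Int) (k : Int) (a : List Int), Dom_solve n k a → Pre_solve n k a → Spec_solve n k a (solve n k a)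
def Claim_changed_solve : Prop := Dom_solve (pvDiffWitness_solve.1) (pvDiffWitness_solve.2.1) (pvDiffWitness_solve.2.2) ∧ Pre_solve (pvDiffWitness_solve.1) (pvDiffWitness_solve.2.1) (pvDiffWitness_solve.2.2) ∧ D_solve (pvDiffWitness_solve.1) (pvDiffWitness_solve.2.1) (pvDiffWitness_solve.2.2) ∧ solve (pvDiffWitness_solve.1) (pvDiffWitness_solve.2.1) (pvDiffWitness_solve.2.2) = pvDiffWitnessOut_solve.1 ∧ solve_alt (pvDiffWitness_solve.1) (pvDiffWitness_solve.2.1) (pvDiffWitness_solve.2.2) = pvDiffWitnessOut_solve.2 ∧ pvDiffWitnessOut_solve.1 ≠ pvDiffWitnessOut_solve.2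
def Claim_exact_solve : Prop := ∀ (n : Int) (k : Int) (a : List Int), Dom_solve n k a → Pre_solve n k a → D_solve n k a → solve n k a ≠ solve_alt n k a

-- ===== LEMMAS AND PROOFS =====

-- the excess sum both programs reason about
def pvE (a : List Int) (x : Int) : Int := (a.map (fun ai => max 0 (ai - x))).sum

-- the unclamped threshold value, read off B's loop started at best = b0 - k
def pvX (k : Int) (a : List Int) : Int :=
  match PySem.List.sorted a (fun x => x) true with
  | [] => 0
  | b0 :: rest => solve_altLoop k 2 b0 (b0 - k) rest

lemma pvE_nonneg (a : List Int) (x : Int) : 0 ≤ pvE a x := by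
  induction a with
  | nil => simp [pvE]
  | cons v r ih => simp only [pvE, List.map_cons, List.sum_cons] at *; omega

lemma pvE_cons (v : Int) (r : List Int) (x : Int) :
    pvE (v :: r) x = max 0 (v - x) + pvE r x := by
  simp [pvE]

lemma pvE_zero (a : List Int) (x : Int) (h : ∀ u ∈ a, u ≤ x) : pvE a x = 0 := by
  induction a with
  | nil => simp [pvE]
  | cons v r ih =>
      rw [pvE_cons, ih (fun u hu => h u (List.mem_cons_of_mem _ hu))]
      have := h v (List.mem_cons_self)
      omega

lemma pv_sum_take_le (l : List Int) (x : Int) (h : ∀ u ∈ l, u ≤ x) :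
    ∀ j : Nat, j ≤ l.length → (l.take j).sum ≤ (j : Int) * x := by
  induction l with
  | nil =>
      intro j hj
      have hj0 : j = 0 := by simpa using hj
      subst hj0; simp
  | cons v r ih =>
      intro j hj
      cases j with
      | zero => simp
      | succ j' =>
          rw [List.take_succ_cons, List.sum_cons]
          have h1 := h v (List.mem_cons_self)
          have h2 := ih (fun u hu => h u (List.mem_cons_of_mem _ hu)) j' (by simpa using hj)
          push_cast
          nlinarith

-- characterisation of "excess ≤ k" on a descending-sorted list via its nonempty prefixes
lemma pvE_le_iff (b : List Int) (hs : b.Pairwise (fun p q => q ≤ p)) (k x : Int) (hk : 0 ≤ k) :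
    pvE b x ≤ k ↔ ∀ j : Nat, 1 ≤ j → j ≤ b.length → (b.take j).sum ≤ k + (j : Int) * x := by
  induction b generalizing k with
  | nil =>
      simp [pvE]
      exact ⟨fun _ j h1 h2 => absurd h2 (by omega), fun _ => hk⟩
  | cons v r ih =>
      rw [List.pairwise_cons] at hs
      obtain ⟨hv, hr⟩ := hs
      by_cases hx : v ≤ x
      · have hE : pvE (v :: r) x = 0 := by
          exact pvE_zero _ _ (by
            intro u hu
            rcases List.mem_cons.mp hu with rfl | hu'
            · exact hx
            · exact le_trans (hv u hu') hx)
        rw [hE]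
        constructor
        · intro _ j hj1 hj2
          have := pv_sum_take_le (v :: r) x (by
            intro u hu
            rcases List.mem_cons.mp hu with rfl | hu'
            · exact hx
            · exact le_trans (hv u hu') hx) j hj2
          omega
        · intro _; exact hk
      · push_neg at hx
        by_cases hkv : v ≤ k + x
        · have hk' : 0 ≤ k + x - v := by omega
          have ihr := ih hr (k + x - v) hk'
          rw [pvE_cons]
          have hmax : max 0 (v - x) = v - x := by omega
          rw [hmax]
          constructor
          · intro hE j hj1 hj2
            cases j with
            | zero => omega
            | succ j' =>
                cases j' with
                | zero => simpa using hkv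
                | succ j'' =>
                    have := (ihr.mp (by omega)) (j'' + 1) (by omega) (by simpa using hj2)
                    rw [List.take_succ_cons, List.sum_cons]
                    push_cast at this ⊢
                    linarith
          · intro hall
            have : pvE r x ≤ k + x - v := by
              apply ihr.mpr
              intro j hj1 hj2
              have := hall (j + 1) (by omega) (by simp; omega)
              rw [List.take_succ_cons, List.sum_cons] at this
              push_cast at this ⊢
              linarith
            omega
        · push_neg at hkv
          constructor
          · intro hE
            exfalso
            rw [pvE_cons] at hE
            have h0 := pvE_nonneg r x
            omega
          · intro hall
            exfalso
            have := hall 1 (by omega) (by simp)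
            simp at this
            omega

-- the loop's result is at least its running need
lemma pv_loop_ge (k : Int) (l : List Int) :
    ∀ (i pref need : Int), need ≤ solve_altLoop k i pref need l := by
  induction l with
  | nil => intro i pref need; simp [solve_altLoop]
  | cons v r ih =>
      intro i pref need
      show need ≤ solve_altLoop k (i+1) (pref+v) (max need _) r
      exact le_trans (le_max_left _ _) (ih _ _ _)

-- a max in the initial need factors out of the loop
lemma pv_loop_max (k : Int) (l : List Int) :
    ∀ (i pref d need : Int),
      solve_altLoop k i pref (max d need) l = max d (solve_altLoop k i pref need l) := by
  induction l with
  | nil => intro i pref d need; simp [solve_altLoop]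
  | cons v r ih =>
      intro i pref d need
      show solve_altLoop k (i+1) (pref+v) (max (max d need) (-(PySem.Int.floordiv (k-(pref+v)) i))) r
            = max d (solve_altLoop k (i+1) (pref+v) (max need (-(PySem.Int.floordiv (k-(pref+v)) i))) r)
      rw [max_assoc, ih]

-- invariant of B's loop: its result is ≤ x iff need ≤ x and every nonempty prefix is feasible
lemma pv_loop_le_iff (k : Int) (l : List Int) :
    ∀ (i pref need x : Int), 0 ≤ i →
      (solve_altLoop k (i + 1) pref need l ≤ x ↔
        need ≤ x ∧ ∀ j : Nat, 1 ≤ j → j ≤ l.length →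
          pref + (l.take j).sum ≤ k + (i + (j : Int)) * x) := by
  induction l with
  | nil =>
      intro i pref need x hi
      simp [solve_altLoop]
      intro _ j hj1 hj2
      omega
  | cons v r ih =>
      intro i pref need x hi
      show solve_altLoop k (i+1+1) (pref+v)
            (max need (-(PySem.Int.floordiv (k - (pref+v)) (i+1)))) r ≤ x ↔ _
      rw [ih (i+1) (pref+v) _ x (by omega)]
      have hcle : -(PySem.Int.floordiv (k - (pref+v)) (i+1)) ≤ x ↔ pref + v ≤ k + (i + 1) * x := by
        rw [neg_le, PySem.Int.le_floordiv_iff_mul_le (by omega : (0:Int) < i + 1)]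
        constructor <;> intro h <;> nlinarith
      constructor
      · rintro ⟨hb, hall⟩
        have hbc : need ≤ x ∧ -(PySem.Int.floordiv (k - (pref+v)) (i+1)) ≤ x := by
          constructor <;> omega
        refine ⟨hbc.1, ?_⟩
        intro j hj1 hj2
        cases j with
        | zero => omega
        | succ j' =>
            cases j' with
            | zero =>
                have h1 := hcle.mp hbc.2
                simp only [List.take_succ_cons, List.take_zero, List.sum_cons, List.sum_nil]
                push_cast
                linarith
            | succ j'' =>
                have h1 := hall (j'' + 1) (by omega) (by simpa using hj2)
                rw [List.take_succ_cons, List.sum_cons]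
                push_cast at h1 ⊢
                ring_nf at h1 ⊢
                linarith
      · rintro ⟨hb, hall⟩
        have h1 := hall 1 (by omega) (by simp)
        simp only [List.take_succ_cons, List.take_zero, List.sum_cons, List.sum_nil] at h1
        have hc : -(PySem.Int.floordiv (k - (pref+v)) (i+1)) ≤ x := by
          apply hcle.mpr
          push_cast at h1
          linarith
        refine ⟨by omega, ?_⟩
        intro j' hj1 hj2
        have h2 := hall (j' + 1) (by omega) (by simp; omega)
        rw [List.take_succ_cons, List.sum_cons] at h2
        push_cast at h2 ⊢
        ring_nf at h2 ⊢
        linarith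

-- Python's max(a): the value and its bounds
lemma pv_max_some (a : List Int) (ha : a ≠ []) :
    ∃ m, PySem.List.max? a (fun x => x) = some m := by
  cases h : PySem.List.max? a (fun x => x) with
  | none => exact absurd ((PySem.List.max?_eq_none_iff a _).mp h) ha
  | some m => exact ⟨m, rfl⟩

-- is_ok is false everywhere when k < 0
lemma pv_isOk_false (k : Int) (a : List Int) (hk : k < 0) (x : Int) :
    solve_isOk k a x = false := by
  have := pvE_nonneg a x
  simp only [solve_isOk, pvE] at *
  simp only [decide_eq_false_iff_not]
  omega

-- is_ok is true at any x above every element (the excess is 0)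
lemma pv_isOk_above (k : Int) (a : List Int) (hk : 0 ≤ k) (x : Int)
    (h : ∀ u ∈ a, u ≤ x) : solve_isOk k a x = true := by
  have h0 := pvE_zero a x h
  simp only [solve_isOk, pvE] at *
  simp only [decide_eq_true_eq]
  omega

-- threshold characterisation of is_ok (k ≥ 0, a nonempty): is_ok x ↔ pvX k a ≤ x
lemma pv_isOk_iff (k : Int) (a : List Int) (ha : a ≠ []) (hk : 0 ≤ k) (x : Int) :
    solve_isOk k a x = true ↔ pvX k a ≤ x := by
  have hperm : (PySem.List.sorted a (fun x => x) true).Perm a := PySem.List.sorted_perm a _ _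
  have hEs : pvE (PySem.List.sorted a (fun x => x) true) x = pvE a x := by
    unfold pvE
    exact (hperm.map (fun ai => max 0 (ai - x))).sum_eq
  have hpw : (PySem.List.sorted a (fun x => x) true).Pairwise (fun p q => q ≤ p) :=
    PySem.List.sorted_pairwise_rev a (fun x => x)
  cases hb : PySem.List.sorted a (fun x => x) true with
  | nil => exact absurd ((PySem.List.sorted_eq_nil_iff a _ _).mp hb) ha
  | cons b0 rest =>
      rw [hb] at hEs hpw
      have hiff := pvE_le_iff (b0 :: rest) hpw k x hk
      have hloop := pv_loop_le_iff k rest 1 b0 (b0 - k) x (by omega)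
      have hX : pvX k a = solve_altLoop k 2 b0 (b0 - k) rest := by
        unfold pvX; rw [hb]
      rw [hX]
      have hok : solve_isOk k a x = true ↔ pvE a x ≤ k := by
        simp [solve_isOk, pvE]
      rw [hok, ← hEs, hiff]
      have h2 : solve_altLoop k 2 b0 (b0 - k) rest ≤ x ↔
          b0 - k ≤ x ∧ ∀ j : Nat, 1 ≤ j → j ≤ rest.length →
            b0 + (rest.take j).sum ≤ k + (1 + (j : Int)) * x := hloop
      rw [h2]
      constructor
      · intro hall
        constructor
        · have h1 := hall 1 (by omega) (by simp)
          simp only [List.take_succ_cons, List.take_zero, List.sum_cons, List.sum_nil] at h1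
          push_cast at h1
          linarith
        · intro j hj1 hj2
          have h2 := hall (j + 1) (by omega) (by simp; omega)
          rw [List.take_succ_cons, List.sum_cons] at h2
          push_cast at h2 ⊢
          ring_nf at h2 ⊢
          linarith
      · rintro ⟨h1, hall⟩
        intro j hj1 hj2
        cases j with
        | zero => omega
        | succ j' =>
            cases j' with
            | zero =>
                simp only [List.take_succ_cons, List.take_zero, List.sum_cons, List.sum_nil]
                push_cast
                linarith
            | succ j'' =>
                have h2 := hall (j'' + 1) (by omega) (by simpa using hj2)
                rw [List.take_succ_cons, List.sum_cons]
                push_cast at h2 ⊢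
                ring_nf at h2 ⊢
                linarith

-- the bisection returns its initial ok when is_ok never holds
lemma pv_bisect_allFalse (k : Int) (a : List Int) (hF : ∀ x, solve_isOk k a x = false) :
    ∀ N : Nat, ∀ ng ok : Int, solve_bisect k a N ng ok = ok := by
  intro N
  induction N with
  | zero => intro ng ok; rfl
  | succ N ih =>
      intro ng ok
      show (if |ok - ng| > 1 then _ else ok) = ok
      by_cases hgt : |ok - ng| > 1
      · simp only [hgt, if_true, hF, Bool.false_eq_true, if_false]
        exact ih _ _
      · simp [hgt]

-- the bisection finds the threshold (clamped to ng+1) for a threshold-shaped is_ok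
lemma pv_bisect_threshold (k : Int) (a : List Int) (T : Int)
    (hT : ∀ x, solve_isOk k a x = true ↔ T ≤ x) :
    ∀ N : Nat, ∀ ng ok : Int, (ok - ng).natAbs ≤ N → ng < ok → T ≤ ok →
      solve_bisect k a N ng ok = max T (ng + 1) := by
  intro N
  induction N with
  | zero =>
      intro ng ok hN hlt hTo
      exfalso; omega
  | succ N ih =>
      intro ng ok hN hlt hTo
      show (if |ok - ng| > 1 then _ else ok) = _
      by_cases hgt : |ok - ng| > 1
      · have hd : 1 < ok - ng := by rcases abs_cases (ok - ng) with ⟨e1, e2⟩ | ⟨e1, e2⟩ <;> omega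
        have hmid : PySem.Int.floordiv (ok + ng) 2 = (ok + ng) / 2 :=
          PySem.Int.floordiv_eq_ediv_of_pos (by omega)
        rw [hmid]
        simp only [hgt, if_true]
        by_cases hok : T ≤ (ok + ng) / 2
        · rw [if_pos ((hT _).mpr hok)]
          rw [ih ng ((ok + ng) / 2) (by omega) (by omega) hok]
        · have : solve_isOk k a ((ok + ng) / 2) = false := by
            cases h : solve_isOk k a ((ok + ng) / 2)
            · rfl
            · exact absurd ((hT _).mp h) hok
          rw [this]
          simp only [Bool.false_eq_true, if_false]
          rw [ih ((ok + ng) / 2) ok (by omega) (by omega) hTo]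
          omega
      · have hd : ok - ng ≤ 1 := by rcases abs_cases (ok - ng) with ⟨e1, e2⟩ | ⟨e1, e2⟩ <;> omega
        simp only [hgt, if_false]
        omega

-- when ok < ng and is_ok holds everywhere at or above ok, the bisection climbs to ng - 1
lemma pv_bisect_climb (k : Int) (a : List Int) :
    ∀ N : Nat, ∀ ng ok : Int, (ok - ng).natAbs ≤ N → ok < ng →
      (∀ y, ok ≤ y → solve_isOk k a y = true) →
      solve_bisect k a N ng ok = ng - 1 := by
  intro N
  induction N with
  | zero =>
      intro ng ok hN hlt hup
      exfalso; omega
  | succ N ih =>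
      intro ng ok hN hlt hup
      show (if |ok - ng| > 1 then _ else ok) = _
      by_cases hgt : |ok - ng| > 1
      · have hd : ok - ng < -1 := by rcases abs_cases (ok - ng) with ⟨e1, e2⟩ | ⟨e1, e2⟩ <;> omega
        have hmid : PySem.Int.floordiv (ok + ng) 2 = (ok + ng) / 2 :=
          PySem.Int.floordiv_eq_ediv_of_pos (by omega)
        rw [hmid]
        simp only [hgt, if_true, hup ((ok + ng) / 2) (by omega)]
        exact ih ng ((ok + ng) / 2) (by omega) (by omega)
          (fun y hy => hup y (by omega))
      · have : ok = ng - 1 := by rcases abs_cases (ok - ng) with ⟨e1, e2⟩ | ⟨e1, e2⟩ <;> omega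
        simp [hgt, this]

-- B's value, factored: solve_alt = min b0 (max 1 (pvX k a)) on a nonempty list
lemma pv_alt_eval (n k : Int) (a : List Int) (b0 : Int) (rest : List Int)
    (hb : PySem.List.sorted a (fun x => x) true = b0 :: rest) :
    solve_alt n k a = min b0 (max 1 (pvX k a)) := by
  have hfd1 : PySem.Int.floordiv (k - (0 + b0)) 1 = k - b0 := by
    rw [PySem.Int.floordiv_eq_ediv_of_pos (by omega : (0:Int) < 1)]
    omega
  have hstep : solve_altLoop k 1 0 1 (b0 :: rest)
      = solve_altLoop k 2 (0 + b0) (max 1 (-(PySem.Int.floordiv (k - (0 + b0)) 1))) rest := rfl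
  have hX : pvX k a = solve_altLoop k 2 b0 (b0 - k) rest := by
    unfold pvX; rw [hb]
  unfold solve_alt
  rw [hb]
  show min b0 (solve_altLoop k 1 0 1 (b0 :: rest)) = _
  rw [hstep, hfd1]
  have : -(k - b0) = b0 - k := by ring
  rw [this]
  have h0 : (0 : Int) + b0 = b0 := by ring
  rw [h0, pv_loop_max, hX]

-- the head of the descending sort is Python's max(a)
lemma pv_sorted_head_max (a : List Int) (m b0 : Int) (rest : List Int)
    (hm : PySem.List.max? a (fun x => x) = some m)
    (hb : PySem.List.sorted a (fun x => x) true = b0 :: rest) : b0 = m := by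
  have hperm : (PySem.List.sorted a (fun x => x) true).Perm a := PySem.List.sorted_perm a _ _
  rw [hb] at hperm
  have hpw : (PySem.List.sorted a (fun x => x) true).Pairwise (fun p q => q ≤ p) :=
    PySem.List.sorted_pairwise_rev a (fun x => x)
  rw [hb, List.pairwise_cons] at hpw
  have hb0mem : b0 ∈ a := hperm.mem_iff.mp (List.mem_cons_self)
  have hmmem : m ∈ a := PySem.List.max?_mem hm
  have hub : ∀ y ∈ a, y ≤ m := by
    intro y hy
    simpa using PySem.List.max?_isMax hm y hy
  have hm_in : m ∈ b0 :: rest := hperm.mem_iff.mpr hmmem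
  have h1 : b0 ≤ m := hub b0 hb0mem
  have h2 : m ≤ b0 := by
    rcases List.mem_cons.mp hm_in with rfl | hr
    · omega
    · exact hpw.1 m hr
  omega

-- ===== VERDICT (by name: the statement is the Claim_ definition above) =====
theorem solve_spec : Claim_unchanged_solve := by
  unfold Claim_unchanged_solve
  intro n k a _ hpre
  unfold Spec_solve
  intro hnD
  unfold Pre_solve at hpre
  obtain ⟨m, hm⟩ := pv_max_some a hpre
  have hub : ∀ y ∈ a, y ≤ m := by
    intro y hy
    simpa using PySem.List.max?_isMax hm y hy
  cases hb : PySem.List.sorted a (fun x => x) true with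
  | nil => exact absurd ((PySem.List.sorted_eq_nil_iff a _ _).mp hb) hpre
  | cons b0 rest =>
      have hb0 : b0 = m := pv_sorted_head_max a m b0 rest hm hb
      rw [pv_alt_eval n k a b0 rest hb, hb0]
      unfold solve
      rw [hm]
      simp only [Option.getD_some]
      by_cases hk : k < 0
      · -- A returns m; B's need exceeds m since pvX ≥ b0 - k > m
        rw [pv_bisect_allFalse k a (pv_isOk_false k a hk) (m - 0).natAbs 0 m]
        have hXge : b0 - k ≤ pvX k a := by
          have : pvX k a = solve_altLoop k 2 b0 (b0 - k) rest := by unfold pvX; rw [hb]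
          rw [this]; exact pv_loop_ge k rest 2 b0 (b0 - k)
        omega
      · push_neg at hk
        have hT := pv_isOk_iff k a hpre hk
        have hXm : pvX k a ≤ m := by
          rw [← hT m]
          exact pv_isOk_above k a hk m hub
        by_cases hm1 : 1 ≤ m
        · rw [pv_bisect_threshold k a (pvX k a) hT (m - 0).natAbs 0 m (le_refl _) (by omega) hXm]
          omega
        · push_neg at hm1
          by_cases hm0 : m = 0
          · subst hm0
            norm_num [solve_bisect]
          · -- m < 0; ¬D_ forces -1 ∈ a, hence m = -1
            have hneg : ∀ x ∈ a, x < 0 := fun x hx => by have := hub x hx; omega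
            have hmem1 : (-1 : Int) ∈ a := by
              by_contra hc
              exact hnD ⟨hpre, hk, hneg, hc⟩
            have hm1' : m = -1 := by
              have := hub (-1) hmem1
              omega
            subst hm1'
            rw [pv_bisect_climb k a ((-1 : Int) - 0).natAbs 0 (-1) (le_refl _) (by omega)
              (fun y hy => pv_isOk_above k a hk y (fun u hu => le_trans (hub u hu) hy))]
            omega

theorem solve_changed : Claim_changed_solve := by
  unfold Claim_changed_solve; decide

theorem solve_tight : Claim_exact_solve := by
  unfold Claim_exact_solve
  intro n k a _ hpre hD
  obtain ⟨hne, hk, hneg, hnm⟩ := hD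
  unfold Pre_solve at hpre
  obtain ⟨m, hm⟩ := pv_max_some a hpre
  have hub : ∀ y ∈ a, y ≤ m := by
    intro y hy
    simpa using PySem.List.max?_isMax hm y hy
  have hmmem : m ∈ a := PySem.List.max?_mem hm
  have hm2 : m ≤ -2 := by
    have h1 := hneg m hmmem
    have h2 : m ≠ -1 := fun h => hnm (h ▸ hmmem)
    omega
  cases hb : PySem.List.sorted a (fun x => x) true with
  | nil => exact absurd ((PySem.List.sorted_eq_nil_iff a _ _).mp hb) hpre
  | cons b0 rest =>
      have hb0 : b0 = m := pv_sorted_head_max a m b0 rest hm hb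
      rw [pv_alt_eval n k a b0 rest hb, hb0]
      unfold solve
      rw [hm]
      simp only [Option.getD_some]
      rw [pv_bisect_climb k a (m - 0).natAbs 0 m (le_refl _) (by omega)
        (fun y hy => pv_isOk_above k a hk y (fun u hu => le_trans (hub u hu) hy))]
      omega
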